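-- pv_equiv track=rewrite | github.com/02Andre/Ordis | Ordis.py | findBestId
-- ===== SOURCE A (Python) =====
-- def minimumEditDistance(s1,s2):
--     if len(s1) > len(s2):
--         s1,s2 = s2,s1
--     distances = range(len(s1) + 1)
--     for index2,char2 in enumerate(s2):
--         newDistances = [index2+1]
--         for index1,char1 in enumerate(s1):
--             if char1 == char2:
--                 newDistances.append(distances[index1])
--             else:
--                 newDistances.append(1 + min((distances[index1],
--                                              distances[index1+1],
--                                              newDistances[-1])))
--         distances = newDistances
--     return distances[-1]
--
-- def findBestId(s1,lst):
--     rid=0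
--     score=100000
--     for i in range(len(lst)):
--         tmpScore=minimumEditDistance(s1,lst[i])
--         if tmpScore<score:
--             score=tmpScore
--             rid=i
--     return rid
-- ===== SOURCE B (Python) =====
-- def _editDistance(s1, s2):
--     """Edit distance via top-down memoized recursion on prefix lengths."""
--     memo = {}
--
--     def d(i, j):
--         if i == 0:
--             return j
--         if j == 0:
--             return i
--         key = (i, j)
--         if key in memo:
--             return memo[key]
--         if s1[i - 1] == s2[j - 1]:
--             res = d(i - 1, j - 1)
--         else:
--             res = 1 + min(d(i - 1, j), d(i, j - 1), d(i - 1, j - 1))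
--         memo[key] = res
--         return res
--
--     return d(len(s1), len(s2))
--
--
-- def findBestId(s1, lst):
--     score = 100000
--     rid = 0
--     for i, s in enumerate(lst):
--         t = _editDistance(s1, s)
--         if t < score:
--             score = t
--             rid = i
--     return rid
-- ===== Notes on version B (the rewrite author's own statement) =====
-- stated objective: alternative
-- what changed: Replaced the bottom-up rolling-row DP (which swaps the strings by length and grows each row by list appends with negative indexing) by a top-down memoized recursion d(i,j) on prefix lengths with no swap; the wrapper scans with enumerate keeping the running minimum.
import Mathlib
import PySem

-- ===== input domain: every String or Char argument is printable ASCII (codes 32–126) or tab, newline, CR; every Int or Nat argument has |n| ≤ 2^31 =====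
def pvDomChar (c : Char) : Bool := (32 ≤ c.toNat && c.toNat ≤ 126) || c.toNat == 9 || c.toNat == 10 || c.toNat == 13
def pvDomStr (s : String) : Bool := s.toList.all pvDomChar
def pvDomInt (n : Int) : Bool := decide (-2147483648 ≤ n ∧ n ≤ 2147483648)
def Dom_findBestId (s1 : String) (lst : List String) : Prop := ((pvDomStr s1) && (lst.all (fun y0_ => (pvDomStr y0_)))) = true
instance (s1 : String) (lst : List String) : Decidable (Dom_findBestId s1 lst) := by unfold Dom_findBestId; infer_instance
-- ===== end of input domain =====

-- B replaces A's bottom-up rolling-row DP (with a length swap and append-built rows) by a top-down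
-- memoized recursion on prefix lengths; same value everywhere (alternative decomposition, no speed claim).

-- ===== PORT A =====
-- inner loop of minimumEditDistance: one row update ('for index1,char1 in enumerate(s1): …')
def medRow (dists : List Int) (a : List Char) (idx2 : Int) (c2 : Char) : List Int :=
  (PySem.List.enumerate a 0).foldl
    (fun nd p =>
      if p.2 = c2 then nd ++ [PySem.List.pyGetD dists p.1 0]
      else nd ++ [1 + min (PySem.List.pyGetD dists p.1 0)
                       (min (PySem.List.pyGetD dists (p.1 + 1) 0)
                            (PySem.List.pyGetD nd (-1) 0))])
    [idx2 + 1]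

def minimumEditDistance (s1 s2 : String) : Int :=
  -- 'if len(s1) > len(s2): s1,s2 = s2,s1'
  let a := if PySem.Str.len s1 > PySem.Str.len s2 then s2.toList else s1.toList
  let b := if PySem.Str.len s1 > PySem.Str.len s2 then s1.toList else s2.toList
  let distances := PySem.List.pyRange 0 ((a.length : Int) + 1) 1   -- range(len(s1)+1)
  let final := (PySem.List.enumerate b 0).foldl (fun d p => medRow d a p.1 p.2) distances
  PySem.List.pyGetD final (-1) 0                                   -- distances[-1]

def findBestId (s1 : String) (lst : List String) : Int :=
  ((PySem.List.pyRange 0 (lst.length : Int) 1).foldl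
    (fun (st : Int × Int) i =>       -- st = (rid, score)
      let t := minimumEditDistance s1 (PySem.List.pyGetD lst i "")
      if t < st.2 then (i, t) else st)
    (0, 100000)).1

-- ===== PORT B =====
-- Source B's memoized recursion d(i, j); memoization only caches, so the port is the recursion itself
def edAlt (x y : List Char) : Nat → Nat → Int
  | 0, j => (j : Int)
  | (i+1), 0 => ((i+1 : Nat) : Int)
  | (i+1), (j+1) =>
      if x.getD i ' ' = y.getD j ' ' then edAlt x y i j
      else 1 + min (edAlt x y i (j+1)) (min (edAlt x y (i+1) j) (edAlt x y i j))

def findBestId_alt (s1 : String) (lst : List String) : Int :=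
  ((PySem.List.enumerate lst 0).foldl
    (fun (st : Int × Int) p =>       -- st = (score, rid)
      let t := edAlt s1.toList p.2.toList s1.toList.length p.2.toList.length
      if t < st.1 then (t, p.1) else st)
    (100000, 0)).2

-- ===== PRECONDITION & SPEC =====
def Spec_findBestId (s1 : String) (lst : List String) (out : Int) : Prop := out = findBestId_alt s1 lst
instance (s1 : String) (lst : List String) (out : Int) : Decidable (Spec_findBestId s1 lst out) := by unfold Spec_findBestId; infer_instance

-- ===== CLAIM (what is proved, stated in full; the proofs are below) =====
def Claim_equal_findBestId : Prop := ∀ (s1 : String) (lst : List String), Dom_findBestId s1 lst → Spec_findBestId s1 lst (findBestId s1 lst)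

-- ===== LEMMAS AND PROOFS =====

theorem edAlt_zero_left (x y : List Char) (j : Nat) : edAlt x y 0 j = (j : Int) := by
  cases j <;> simp [edAlt]

theorem edAlt_zero_right (x y : List Char) (i : Nat) : edAlt x y i 0 = (i : Int) := by
  cases i <;> simp [edAlt]

theorem edAlt_symm (x y : List Char) : ∀ i j, edAlt x y i j = edAlt y x j i := by
  intro i
  induction i with
  | zero => intro j; simp [edAlt_zero_left, edAlt_zero_right]
  | succ i ih =>
    intro j
    induction j with
    | zero => simp [edAlt_zero_left, edAlt_zero_right]
    | succ j ihj =>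
      by_cases h : x.getD i ' ' = y.getD j ' '
      · simp only [edAlt, if_pos h, if_pos h.symm]
        exact ih j
      · have h' : ¬ (y.getD j ' ' = x.getD i ' ') := fun hh => h hh.symm
        simp only [edAlt, if_neg h, if_neg h', ← ih, ← ihj]
        omega

theorem mapRange_getD (f : Nat → Int) (n k : Nat) (h : k < n) :
    ((List.range n).map f).getD k 0 = f k := by
  rw [List.getD_eq_getElem?_getD]
  simp [h]

-- A's inner loop over s1, started after k processed characters, completes the next row
theorem medRow_fold (a b : List Char) (j : Nat) :
    ∀ (rest : List Char) (k : Nat), k ≤ a.length → a.drop k = rest →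
    (PySem.List.enumerate rest (k : Int)).foldl
      (fun nd p =>
        if p.2 = b.getD j ' ' then
          nd ++ [PySem.List.pyGetD ((List.range (a.length+1)).map (fun i => edAlt a b i j)) p.1 0]
        else
          nd ++ [1 + min (PySem.List.pyGetD ((List.range (a.length+1)).map (fun i => edAlt a b i j)) p.1 0)
                      (min (PySem.List.pyGetD ((List.range (a.length+1)).map (fun i => edAlt a b i j)) (p.1 + 1) 0)
                           (PySem.List.pyGetD nd (-1) 0))])
      ((List.range (k+1)).map (fun i => edAlt a b i (j+1)))
    = (List.range (a.length+1)).map (fun i => edAlt a b i (j+1)) := by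
  intro rest
  induction rest with
  | nil =>
    intro k hk hdrop
    have hkl : a.length ≤ k := List.drop_eq_nil_iff.mp hdrop
    have hke : k = a.length := le_antisymm hk hkl
    subst hke
    simp [PySem.List.enumerate]
  | cons c rest' ih =>
    intro k hk hdrop
    have hlt : k < a.length := by
      rcases Nat.lt_or_ge k a.length with hh | hh
      · exact hh
      · rw [List.drop_eq_nil_iff.mpr hh] at hdrop; simp at hdrop
    have hget : a[k]? = some c := by
      have h0 : (a.drop k)[0]? = some c := by rw [hdrop]; rfl
      rwa [List.getElem?_drop, Nat.add_zero] at h0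
    have hc : a.getD k ' ' = c := by
      rw [List.getD_eq_getElem?_getD, hget]; rfl
    have hdrop' : a.drop (k+1) = rest' := by
      rw [← List.tail_drop, hdrop]; rfl
    rw [PySem.List.enumerate_cons, List.foldl_cons]
    have hstep :
        (if c = b.getD j ' ' then
          ((List.range (k+1)).map (fun i => edAlt a b i (j+1))) ++
            [PySem.List.pyGetD ((List.range (a.length+1)).map (fun i => edAlt a b i j)) ((k : Int)) 0]
        else
          ((List.range (k+1)).map (fun i => edAlt a b i (j+1))) ++
            [1 + min (PySem.List.pyGetD ((List.range (a.length+1)).map (fun i => edAlt a b i j)) ((k : Int)) 0)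
                  (min (PySem.List.pyGetD ((List.range (a.length+1)).map (fun i => edAlt a b i j)) (((k : Int)) + 1) 0)
                       (PySem.List.pyGetD ((List.range (k+1)).map (fun i => edAlt a b i (j+1))) (-1) 0))])
        = (List.range (k+1+1)).map (fun i => edAlt a b i (j+1)) := by
      have e1 : PySem.List.pyGetD ((List.range (a.length+1)).map (fun i => edAlt a b i j)) ((k : Int)) 0
          = edAlt a b k j := by
        rw [PySem.List.pyGetD_natCast, mapRange_getD _ _ _ (by omega)]
      have e2 : PySem.List.pyGetD ((List.range (a.length+1)).map (fun i => edAlt a b i j)) (((k : Int)) + 1) 0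
          = edAlt a b (k+1) j := by
        have : ((k : Int)) + 1 = ((k + 1 : Nat) : Int) := by push_cast; ring
        rw [this, PySem.List.pyGetD_natCast, mapRange_getD _ _ _ (by omega)]
      have e3 : PySem.List.pyGetD ((List.range (k+1)).map (fun i => edAlt a b i (j+1))) (-1) 0
          = edAlt a b k (j+1) := by
        rw [List.range_succ, List.map_append, List.map_singleton, PySem.List.pyGetD_neg_one_append_singleton]
      have e4 : (List.range (k+1+1)).map (fun i => edAlt a b i (j+1))
          = ((List.range (k+1)).map (fun i => edAlt a b i (j+1))) ++ [edAlt a b (k+1) (j+1)] := by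
        rw [List.range_succ, List.map_append]; rfl
      rw [e1, e2, e3, e4]
      by_cases hcb : c = b.getD j ' '
      · rw [if_pos hcb]
        have : edAlt a b (k+1) (j+1) = edAlt a b k j := by
          simp only [edAlt, if_pos (hc.trans hcb)]
        rw [this]
      · rw [if_neg hcb]
        have hne : ¬ (a.getD k ' ' = b.getD j ' ') := by rw [hc]; exact hcb
        have : edAlt a b (k+1) (j+1)
            = 1 + min (edAlt a b k (j+1)) (min (edAlt a b (k+1) j) (edAlt a b k j)) := by
          simp only [edAlt, if_neg hne]
        rw [this]
        congr 1
        simp [min_comm, min_left_comm]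
    rw [hstep]
    have hcast : (k : Int) + 1 = ((k + 1 : Nat) : Int) := by push_cast; ring
    rw [hcast]
    exact ih (k+1) hlt hdrop'

theorem medRow_spec (a b : List Char) (j : Nat) :
    medRow ((List.range (a.length+1)).map (fun i => edAlt a b i j)) a (j : Int) (b.getD j ' ')
      = (List.range (a.length+1)).map (fun i => edAlt a b i (j+1)) := by
  have h0 := medRow_fold a b j a 0 (Nat.zero_le _) rfl
  unfold medRow
  have hinit : [((j : Int)) + 1] = (List.range (0+1)).map (fun i => edAlt a b i (j+1)) := by
    simp [edAlt_zero_left]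
  rw [hinit]
  simpa using h0

theorem med_loop (a b : List Char) :
    ∀ (rest : List Char) (j : Nat), j ≤ b.length → b.drop j = rest →
    (PySem.List.enumerate rest (j : Int)).foldl (fun d p => medRow d a p.1 p.2)
        ((List.range (a.length+1)).map (fun i => edAlt a b i j))
      = (List.range (a.length+1)).map (fun i => edAlt a b i b.length) := by
  intro rest
  induction rest with
  | nil =>
    intro j hj hdrop
    have hje : j = b.length := le_antisymm hj (List.drop_eq_nil_iff.mp hdrop)
    subst hje
    simp [PySem.List.enumerate]
  | cons c rest' ih =>
    intro j hj hdrop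
    have hlt : j < b.length := by
      rcases Nat.lt_or_ge j b.length with hh | hh
      · exact hh
      · rw [List.drop_eq_nil_iff.mpr hh] at hdrop; simp at hdrop
    have hget : b[j]? = some c := by
      have h0 : (b.drop j)[0]? = some c := by rw [hdrop]; rfl
      rwa [List.getElem?_drop, Nat.add_zero] at h0
    have hc : b.getD j ' ' = c := by
      rw [List.getD_eq_getElem?_getD, hget]; rfl
    have hdrop' : b.drop (j+1) = rest' := by
      rw [← List.tail_drop, hdrop]; rfl
    rw [PySem.List.enumerate_cons, List.foldl_cons]
    show (PySem.List.enumerate rest' ((j : Int) + 1)).foldl (fun d p => medRow d a p.1 p.2)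
        (medRow ((List.range (a.length+1)).map (fun i => edAlt a b i j)) a ((j : Int)) c)
      = (List.range (a.length+1)).map (fun i => edAlt a b i b.length)
    rw [← hc, medRow_spec a b j]
    have hcast : (j : Int) + 1 = ((j + 1 : Nat) : Int) := by push_cast; ring
    rw [hcast]
    exact ih (j+1) hlt hdrop'

theorem med_core (a b : List Char) :
    PySem.List.pyGetD
      ((PySem.List.enumerate b 0).foldl (fun d p => medRow d a p.1 p.2)
        (PySem.List.pyRange 0 ((a.length : Int) + 1) 1)) (-1) 0
    = edAlt a b a.length b.length := by
  have h1 : PySem.List.pyRange 0 ((a.length : Int) + 1) 1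
      = (List.range (a.length+1)).map (fun i => edAlt a b i 0) := by
    rw [PySem.List.pyRange_one]
    have : (((a.length : Int) + 1) - 0).toNat = a.length + 1 := by omega
    rw [this]
    exact List.map_congr_left (fun k _ => by rw [edAlt_zero_right]; ring)
  rw [h1]
  have h2 := med_loop a b b 0 (Nat.zero_le _) rfl
  simp only [Nat.cast_zero] at h2
  rw [h2, List.range_succ, List.map_append, List.map_singleton,
      PySem.List.pyGetD_neg_one_append_singleton]

theorem minimumEditDistance_eq (s1 s2 : String) :
    minimumEditDistance s1 s2 = edAlt s1.toList s2.toList s1.toList.length s2.toList.length := by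
  unfold minimumEditDistance
  by_cases h : PySem.Str.len s1 > PySem.Str.len s2
  · simp only [if_pos h]
    rw [med_core s2.toList s1.toList, edAlt_symm]
  · simp only [if_neg h]
    rw [med_core s1.toList s2.toList]

theorem argmin_swap (s1 : String) (lst : List String) :
    ∀ (idxs : List Int) (rid score : Int),
    ((idxs.foldl (fun (st : Int × Int) i =>
        let t := edAlt s1.toList (PySem.List.pyGetD lst i "").toList s1.toList.length
                   (PySem.List.pyGetD lst i "").toList.length
        if t < st.2 then (i, t) else st) (rid, score)).1)
    = ((idxs.foldl (fun (st : Int × Int) i =>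
        let t := edAlt s1.toList (PySem.List.pyGetD lst i "").toList s1.toList.length
                   (PySem.List.pyGetD lst i "").toList.length
        if t < st.1 then (t, i) else st) (score, rid)).2) := by
  intro idxs
  induction idxs with
  | nil => intro rid score; rfl
  | cons i is ih =>
    intro rid score
    simp only [List.foldl_cons]
    by_cases h : edAlt s1.toList (PySem.List.pyGetD lst i "").toList s1.toList.length
        (PySem.List.pyGetD lst i "").toList.length < score
    · simp only [if_pos h]
      exact ih i _
    · simp only [if_neg h]
      exact ih rid score

-- ===== VERDICT (by name: the statement is the Claim_ definition above) =====
theorem findBestId_spec : Claim_equal_findBestId := by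
  intro s1 lst _
  unfold Spec_findBestId findBestId findBestId_alt
  rw [PySem.List.enumerate_eq_map_pyRange lst ""]
  rw [List.foldl_map]
  simp only [minimumEditDistance_eq]
  exact argmin_swap s1 lst _ 0 100000
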